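-- pv_equiv track=rewrite | github.com/arindhimar/BluePineapple | Python Programs/28-01-26/271.py | sum_of_fifth_power_of_even_natural_numbers
-- ===== SOURCE A (Python) =====
-- def sum_of_fifth_power_of_even_natural_numbers(n):
--     if n < 1:
--         raise ValueError("Input must be a positive integer")
--
--     temp_sum = 0
--     for i in range(n):
--         even_number = 2 * (i + 1)
--         temp_sum += even_number ** 5
--
--     return temp_sum
-- ===== SOURCE B (Python) =====
-- def sum_of_fifth_power_of_even_natural_numbers(n):
--     if n < 1:
--         raise ValueError("Input must be a positive integer")
--     return 32 * n * n * (n + 1) * (n + 1) * (2 * n * n + 2 * n - 1) // 12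
-- ===== Notes on version B (the rewrite author's own statement) =====
-- stated objective: faster
-- what changed: Replaced the O(n) loop summing (2(i+1))**5 with the closed-form Faulhaber formula 32*n^2*(n+1)^2*(2n^2+2n-1)//12, evaluated in O(1).
import Mathlib
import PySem

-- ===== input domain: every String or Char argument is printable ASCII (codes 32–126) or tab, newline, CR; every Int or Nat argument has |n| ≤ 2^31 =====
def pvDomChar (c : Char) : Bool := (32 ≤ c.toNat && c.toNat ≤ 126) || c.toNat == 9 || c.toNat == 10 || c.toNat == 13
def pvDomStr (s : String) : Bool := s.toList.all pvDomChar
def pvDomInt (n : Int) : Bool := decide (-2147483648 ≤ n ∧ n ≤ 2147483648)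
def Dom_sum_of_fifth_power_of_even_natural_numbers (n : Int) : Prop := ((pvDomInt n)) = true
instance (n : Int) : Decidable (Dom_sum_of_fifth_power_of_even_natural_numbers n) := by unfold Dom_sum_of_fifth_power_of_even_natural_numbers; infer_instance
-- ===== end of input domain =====

-- B replaces A's O(n) summation loop with the exact closed-form 32*n^2*(n+1)^2*(2n^2+2n-1)//12 (O(1)).
-- Both raise ValueError for n < 1, excluded by Pre_.

-- ===== PORT A =====
-- the loop: temp_sum += (2*(i+1))**5 over i in range(n); n < 1 raises (outside Pre_, value 0 is arbitrary)
def sum_of_fifth_power_of_even_natural_numbers (n : Int) : Int :=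
  if n < 1 then 0
  else (PySem.List.pyRange 0 n 1).foldl (fun temp_sum i => temp_sum + (2 * (i + 1)) ^ (5 : Nat)) 0

-- ===== PORT B =====
def sum_of_fifth_power_of_even_natural_numbers_alt (n : Int) : Int :=
  if n < 1 then 0
  else PySem.Int.floordiv (32 * n * n * (n + 1) * (n + 1) * (2 * n * n + 2 * n - 1)) 12

-- ===== PRECONDITION & SPEC =====
-- A raises ValueError for n < 1
def Pre_sum_of_fifth_power_of_even_natural_numbers (n : Int) : Prop := 1 ≤ n
instance (n : Int) : Decidable (Pre_sum_of_fifth_power_of_even_natural_numbers n) := by unfold Pre_sum_of_fifth_power_of_even_natural_numbers; infer_instance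
def pvWitness_sum_of_fifth_power_of_even_natural_numbers : Int := 3

def Spec_sum_of_fifth_power_of_even_natural_numbers (n : Int) (out : Int) : Prop := out = sum_of_fifth_power_of_even_natural_numbers_alt n
instance (n : Int) (out : Int) : Decidable (Spec_sum_of_fifth_power_of_even_natural_numbers n out) := by unfold Spec_sum_of_fifth_power_of_even_natural_numbers; infer_instance

-- ===== CLAIM (what is proved, stated in full; the proofs are below) =====
def Claim_equal_sum_of_fifth_power_of_even_natural_numbers : Prop := ∀ (n : Int), Dom_sum_of_fifth_power_of_even_natural_numbers n → Pre_sum_of_fifth_power_of_even_natural_numbers n → Spec_sum_of_fifth_power_of_even_natural_numbers n (sum_of_fifth_power_of_even_natural_numbers n)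

-- ===== LEMMAS AND PROOFS =====

-- loop invariant: twelve times A's running sum over range(m) is the closed-form numerator
lemma pv_sum_loop (m : Nat) :
    12 * ((PySem.List.pyRange 0 (m : Int) 1).foldl (fun temp_sum i => temp_sum + (2 * (i + 1)) ^ (5 : Nat)) 0)
      = 32 * (m : Int) * m * (m + 1) * (m + 1) * (2 * m * m + 2 * m - 1) := by
  induction m with
  | zero => simp
  | succ k ih =>
    have h : PySem.List.pyRange 0 ((k : Int) + 1) 1
        = PySem.List.pyRange 0 (k : Int) 1 ++ [(k : Int)] :=
      PySem.List.pyRange_one_succ_right (by exact_mod_cast Nat.zero_le k)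
    push_cast
    rw [h, List.foldl_append]
    simp only [List.foldl]
    have ih' := ih
    push_cast at ih'
    nlinarith [ih']

theorem sum_pv_main (n : Int) (hn : 1 ≤ n) :
    sum_of_fifth_power_of_even_natural_numbers n = sum_of_fifth_power_of_even_natural_numbers_alt n := by
  unfold sum_of_fifth_power_of_even_natural_numbers sum_of_fifth_power_of_even_natural_numbers_alt
  rw [if_neg (by omega), if_neg (by omega)]
  obtain ⟨m, rfl⟩ : ∃ m : Nat, n = (m : Int) := ⟨n.toNat, by omega⟩
  have h := pv_sum_loop m
  have h12 : (32 * (m : Int) * m * (m + 1) * (m + 1) * (2 * m * m + 2 * m - 1))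
      = 12 * ((PySem.List.pyRange 0 (m : Int) 1).foldl (fun temp_sum i => temp_sum + (2 * (i + 1)) ^ (5 : Nat)) 0) := h.symm
  rw [PySem.Int.floordiv, h12, Int.mul_fdiv_cancel_left _ (by norm_num)]

-- ===== VERDICT (by name: the statement is the Claim_ definition above) =====
theorem sum_of_fifth_power_of_even_natural_numbers_spec : Claim_equal_sum_of_fifth_power_of_even_natural_numbers := by
  intro n _ hpre
  unfold Spec_sum_of_fifth_power_of_even_natural_numbers
  exact sum_pv_main n hpre
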